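-- pv_equiv track=rewrite | github.com/DattaKatakam/finding_redundant_elements | src/dimac_solver.py | negated_dimac
-- ===== SOURCE A (Python) =====
-- import itertools
--
-- def negated_dimac(dimacs_input_list):
--     combinations_maker = list(itertools.product(*dimacs_input_list))
--     negated_output_list = []
--     for combo in combinations_maker:
--         transformed_combo = []
--         for x in combo: transformed_combo.append(-x)
--         negated_output_list.append(transformed_combo)
--
--     return negated_output_list
-- ===== SOURCE B (Python) =====
-- def negated_dimac(dimacs_input_list):
--     if not dimacs_input_list:
--         return [[]]
--     first, rest = dimacs_input_list[0], dimacs_input_list[1:]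
--     tails = negated_dimac(rest)
--     return [[-x] + t for x in first for t in tails]
-- ===== Notes on version B (the rewrite author's own statement) =====
-- stated objective: alternative
-- what changed: Replaces itertools.product-then-negate (build all tuples, then a second pass negating each) with a direct structural recursion that computes the negated product in one pass: recurse on the tail, then prefix each negated head element to every tail row.
import Mathlib
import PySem

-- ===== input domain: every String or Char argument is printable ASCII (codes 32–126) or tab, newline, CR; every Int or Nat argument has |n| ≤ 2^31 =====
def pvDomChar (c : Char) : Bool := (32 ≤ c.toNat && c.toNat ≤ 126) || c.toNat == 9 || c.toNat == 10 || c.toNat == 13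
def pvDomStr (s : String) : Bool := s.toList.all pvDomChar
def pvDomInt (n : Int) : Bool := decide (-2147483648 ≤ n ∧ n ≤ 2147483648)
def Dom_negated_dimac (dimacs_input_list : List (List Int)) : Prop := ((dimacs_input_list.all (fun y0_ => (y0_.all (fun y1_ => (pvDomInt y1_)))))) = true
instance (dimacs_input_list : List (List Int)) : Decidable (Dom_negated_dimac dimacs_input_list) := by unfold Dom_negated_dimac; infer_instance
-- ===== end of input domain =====

-- B replaces product-then-negate (two passes) with one fused structural recursion; objective: alternative decomposition, same cost.

-- ===== PORT A =====
-- itertools.product(*pools): standard iterative construction, rightmost varies fastest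
def pvProduct (pools : List (List Int)) : List (List Int) :=
  pools.foldl (fun acc pool => acc.flatMap (fun row => pool.map (fun x => row ++ [x]))) [[]]

def negated_dimac (dimacs_input_list : List (List Int)) : List (List Int) :=
  let combinations_maker := pvProduct dimacs_input_list
  let negated_output_list := combinations_maker.foldl (fun out combo =>
    let transformed_combo := combo.foldl (fun t x => t ++ [-x]) []
    out ++ [transformed_combo]) []
  negated_output_list

-- ===== PORT B =====
def negated_dimac_alt (dimacs_input_list : List (List Int)) : List (List Int) :=
  match dimacs_input_list with
  | [] => [[]]
  | first :: rest =>
    let tails := negated_dimac_alt rest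
    first.flatMap (fun x => tails.map (fun t => [-x] ++ t))

-- ===== PRECONDITION & SPEC =====
def Spec_negated_dimac (dimacs_input_list : List (List Int)) (out : List (List Int)) : Prop := out = negated_dimac_alt dimacs_input_list
instance (dimacs_input_list : List (List Int)) (out : List (List Int)) : Decidable (Spec_negated_dimac dimacs_input_list out) := by unfold Spec_negated_dimac; infer_instance

-- ===== CLAIM (what is proved, stated in full; the proofs are below) =====
def Claim_equal_negated_dimac : Prop := ∀ (dimacs_input_list : List (List Int)), Dom_negated_dimac dimacs_input_list → Spec_negated_dimac dimacs_input_list (negated_dimac dimacs_input_list)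

-- ===== LEMMAS AND PROOFS =====

-- recursive characterisation of the (un-negated) product
def pvProdRec (pools : List (List Int)) : List (List Int) :=
  match pools with
  | [] => [[]]
  | p :: ps => p.flatMap (fun x => (pvProdRec ps).map (fun t => x :: t))

theorem foldl_append_snoc (l : List Int) (a : List Int) :
    l.foldl (fun t x => t ++ [-x]) a = a ++ l.map (fun x => -x) := by
  induction l generalizing a with
  | nil => simp
  | cons x xs ih => simp [List.foldl, ih]

theorem foldl_out_append (rows : List (List Int)) (a : List (List Int)) :
    rows.foldl (fun out combo => out ++ [combo.foldl (fun t x => t ++ [-x]) []]) a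
      = a ++ rows.map (fun combo => combo.map (fun x => -x)) := by
  induction rows generalizing a with
  | nil => simp
  | cons r rs ih =>
    rw [List.foldl_cons, foldl_append_snoc, ih]
    simp

theorem pvProduct_foldl_general (pools : List (List Int)) (acc : List (List Int)) :
    pools.foldl (fun acc pool => acc.flatMap (fun row => pool.map (fun x => row ++ [x]))) acc
      = acc.flatMap (fun row => (pvProdRec pools).map (fun t => row ++ t)) := by
  induction pools generalizing acc with
  | nil => simp [pvProdRec]
  | cons p ps ih =>
    simp only [List.foldl, ih, pvProdRec]
    simp [List.flatMap_assoc, List.map_flatMap, List.flatMap_map, Function.comp_def,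
      List.append_assoc]

theorem pvProduct_eq_rec (pools : List (List Int)) : pvProduct pools = pvProdRec pools := by
  simp [pvProduct, pvProduct_foldl_general]

theorem alt_eq_neg_prod (pools : List (List Int)) :
    negated_dimac_alt pools = (pvProdRec pools).map (fun combo => combo.map (fun x => -x)) := by
  induction pools with
  | nil => simp [negated_dimac_alt, pvProdRec]
  | cons p ps ih =>
    simp [negated_dimac_alt, pvProdRec, ih, List.map_flatMap,
      Function.comp_def]

-- ===== VERDICT (by name: the statement is the Claim_ definition above) =====
theorem negated_dimac_spec : Claim_equal_negated_dimac := by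
  intro l _
  unfold Spec_negated_dimac negated_dimac
  simp only [foldl_out_append, List.nil_append, pvProduct_eq_rec, alt_eq_neg_prod]
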